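-- pv_equiv track=rewrite | github.com/ArcProjet/ARC | primitive.py | growingColor3
-- ===== SOURCE A (Python) =====
-- def gridCopy(grid):
--     res = [[0 for _ in range(len(grid[0]))] for _ in range(len(grid))]
--     for i in range(0, len(grid)):
--         for j in range(0, len(grid[i])):
--             res[i][j] = grid[i][j]
--     return res
--
-- def growingColor3(grid):
--     res = gridCopy(grid)
--     for i in range(1, len(grid)):
--         for j in range(len(grid[0])):
--             if (grid[i][j] == 3):
--                 res[i - 1][j] = 3
--     for k in range(0, len(grid)):
--         for l in range(len(grid[0]) - 2, -1, -1):
--             if (grid[k][l] == 3):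
--                 res[k][l + 1] = 3
--     for m in range(len(grid) - 2, -1, -1):
--         for n in range(len(grid[0])):
--             if (grid[m][n] == 3):
--                 res[m + 1][n] = 3
--     for o in range(len(grid)):
--         for p in range(1, len(grid[0])):
--             if (grid[o][p] == 3):
--                 res[o][p - 1] = 3
--     return res
-- ===== SOURCE B (Python) =====
-- def growingColor3(grid):
--     h, w = len(grid), len(grid[0])
--
--     def cell(i, j):
--         if (i > 0 and grid[i - 1][j] == 3) or (i < h - 1 and grid[i + 1][j] == 3) \
--            or (j > 0 and grid[i][j - 1] == 3) or (j < w - 1 and grid[i][j + 1] == 3):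
--             return 3
--         return grid[i][j]
--
--     return [[cell(i, j) for j in range(w)] for i in range(h)]
-- ===== Notes on version B (the rewrite author's own statement) =====
-- stated objective: simpler
-- what changed: Replaces A's four mutating directional scatter passes over a copied grid by a single pure per-cell gather comprehension that looks at the four orthogonal neighbors of each cell.
-- outside the precondition, e.g. on growingColor3([]): A returns [], B raises IndexError
import Mathlib
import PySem

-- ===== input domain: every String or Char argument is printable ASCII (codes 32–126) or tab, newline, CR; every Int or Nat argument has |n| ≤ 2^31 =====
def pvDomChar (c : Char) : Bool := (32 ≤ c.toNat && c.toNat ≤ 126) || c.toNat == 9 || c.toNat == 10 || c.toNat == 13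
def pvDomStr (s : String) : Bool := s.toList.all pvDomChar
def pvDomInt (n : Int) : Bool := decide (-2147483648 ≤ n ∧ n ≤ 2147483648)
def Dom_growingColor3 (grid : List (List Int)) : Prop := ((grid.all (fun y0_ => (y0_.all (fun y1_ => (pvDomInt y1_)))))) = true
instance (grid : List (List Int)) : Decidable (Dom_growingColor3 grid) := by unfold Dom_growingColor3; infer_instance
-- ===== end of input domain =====

-- B fuses A's four mutating directional passes into one pure per-cell neighbor check (objective: simpler).

-- shared indexing helpers: grid[i][j] read with Python index semantics, and in-place res[i][j] = v
def pvRead (g : List (List Int)) (i j : Int) : Int :=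
  PySem.List.pyGetD (PySem.List.pyGetD g i ([] : List Int)) j 0

def pvWrite (g : List (List Int)) (i j : Int) (v : Int) : List (List Int) :=
  g.set i.toNat ((g.getD i.toNat []).set j.toNat v)

-- ===== PORT A =====
def pvGridCopy (grid : List (List Int)) : List (List Int) :=
  let res := (PySem.List.pyRange 0 grid.length 1).map (fun _ =>
    (PySem.List.pyRange 0 (PySem.List.pyGetD grid 0 ([] : List Int)).length 1).map (fun _ => (0 : Int)))
  (PySem.List.pyRange 0 grid.length 1).foldl (fun res i =>
    (PySem.List.pyRange 0 (PySem.List.pyGetD grid i ([] : List Int)).length 1).foldl (fun res j =>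
      pvWrite res i j (pvRead grid i j)) res) res

def growingColor3 (grid : List (List Int)) : List (List Int) :=
  let h : Int := grid.length
  let w : Int := (PySem.List.pyGetD grid 0 ([] : List Int)).length
  let res0 := pvGridCopy grid
  let res1 := (PySem.List.pyRange 1 h 1).foldl (fun res i =>
    (PySem.List.pyRange 0 w 1).foldl (fun res j =>
      if pvRead grid i j = 3 then pvWrite res (i - 1) j 3 else res) res) res0
  let res2 := (PySem.List.pyRange 0 h 1).foldl (fun res k =>
    (PySem.List.pyRange (w - 2) (-1) (-1)).foldl (fun res l =>
      if pvRead grid k l = 3 then pvWrite res k (l + 1) 3 else res) res) res1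
  let res3 := (PySem.List.pyRange (h - 2) (-1) (-1)).foldl (fun res m =>
    (PySem.List.pyRange 0 w 1).foldl (fun res n =>
      if pvRead grid m n = 3 then pvWrite res (m + 1) n 3 else res) res) res2
  (PySem.List.pyRange 0 h 1).foldl (fun res o =>
    (PySem.List.pyRange 1 w 1).foldl (fun res p =>
      if pvRead grid o p = 3 then pvWrite res o (p - 1) 3 else res) res) res3

-- ===== PORT B =====
def pvCell (grid : List (List Int)) (h w i j : Int) : Int :=
  if (i > 0 ∧ pvRead grid (i - 1) j = 3) ∨ (i < h - 1 ∧ pvRead grid (i + 1) j = 3)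
     ∨ (j > 0 ∧ pvRead grid i (j - 1) = 3) ∨ (j < w - 1 ∧ pvRead grid i (j + 1) = 3)
  then 3 else pvRead grid i j

def growingColor3_alt (grid : List (List Int)) : List (List Int) :=
  let h : Int := grid.length
  let w : Int := (PySem.List.pyGetD grid 0 ([] : List Int)).length
  (PySem.List.pyRange 0 h 1).map (fun i =>
    (PySem.List.pyRange 0 w 1).map (fun j => pvCell grid h w i j))

-- ===== PRECONDITION & SPEC =====
-- Pre_ excludes the empty grid, where A returns [] vacuously but the natural B indexes grid[0]
-- and raises IndexError, and ragged grids, on which A itself raises IndexError.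
def Pre_growingColor3 (grid : List (List Int)) : Prop :=
  grid ≠ [] ∧ ∀ r ∈ grid, r.length = (grid.headD []).length
instance (grid : List (List Int)) : Decidable (Pre_growingColor3 grid) := by
  unfold Pre_growingColor3; infer_instance

def pvWitness_growingColor3 : List (List Int) := [[3, 0], [0, 0]]

def Spec_growingColor3 (grid : List (List Int)) (out : List (List Int)) : Prop := out = growingColor3_alt grid
instance (grid : List (List Int)) (out : List (List Int)) : Decidable (Spec_growingColor3 grid out) := by unfold Spec_growingColor3; infer_instance

-- ===== CLAIM (what is proved, stated in full; the proofs are below) =====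
def Claim_equal_growingColor3 : Prop := ∀ (grid : List (List Int)), Dom_growingColor3 grid → Pre_growingColor3 grid → Spec_growingColor3 grid (growingColor3 grid)

-- ===== LEMMAS AND PROOFS =====

def pvShape (g : List (List Int)) : List Nat := g.map List.length

def rdN (g : List (List Int)) (a b : Nat) : Int := (g.getD a []).getD b 0

lemma pvRead_natCast (g : List (List Int)) (a b : Nat) : pvRead g (a : Int) (b : Int) = rdN g a b := by
  simp [pvRead, rdN]

lemma pvShape_length (g : List (List Int)) : (pvShape g).length = g.length := by
  simp [pvShape]

lemma pvShape_getD (g : List (List Int)) (a : Nat) : (pvShape g).getD a 0 = (g.getD a []).length := by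
  by_cases h : a < g.length
  · rw [List.getD_eq_getElem _ _ (by simpa [pvShape] using h), List.getD_eq_getElem _ _ h]
    simp [pvShape]
  · rw [List.getD_eq_default _ _ (by simpa [pvShape] using Nat.le_of_not_lt h),
        List.getD_eq_default _ _ (Nat.le_of_not_lt h)]
    rfl

lemma getD_set_1d {α : Type} (l : List α) (n k : Nat) (x d : α) :
    (l.set n x).getD k d = if n = k ∧ n < l.length then x else l.getD k d := by
  rcases Nat.lt_or_ge k l.length with hk | hk
  · rw [List.getD_eq_getElem _ _ (by simpa using hk), List.getD_eq_getElem _ _ hk]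
    rw [List.getElem_set]
    split_ifs with h1 h2 h2 <;> first | rfl | omega
  · rw [List.getD_eq_default _ _ (by simpa using hk), List.getD_eq_default _ _ hk]
    split_ifs with h1
    · omega
    · rfl

lemma pvShape_pvWrite (g : List (List Int)) (i j : Int) (v : Int) :
    pvShape (pvWrite g i j v) = pvShape g := by
  unfold pvWrite pvShape
  rw [List.map_set]
  apply List.ext_getElem
  · simp
  · intro k h1 h2
    rw [List.getElem_set]
    split_ifs with h
    · subst h
      simp only [List.length_set, List.length_map] at h1
      rw [List.getElem_map]
      simp [List.getElem?_eq_getElem h1]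
    · rfl

lemma rdN_pvWrite (g : List (List Int)) (i j : Int) (v : Int) (a b : Nat)
    (hi : 0 ≤ i) (hj : 0 ≤ j) :
    rdN (pvWrite g i j v) a b =
      if i = (a : Int) ∧ j = (b : Int) ∧ a < g.length ∧ b < (g.getD a []).length then v
      else rdN g a b := by
  unfold rdN pvWrite
  by_cases hc : i = (a : Int) ∧ j = (b : Int) ∧ a < g.length ∧ b < (g.getD a []).length
  · rw [if_pos hc]
    obtain ⟨h1, h2, h3, h4⟩ := hc
    have hia : i.toNat = a := by omega
    have hjb : j.toNat = b := by omega
    rw [getD_set_1d, if_pos ⟨hia, by omega⟩, getD_set_1d, if_pos ⟨hjb, by rw [hjb, hia]; exact h4⟩]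
  · rw [if_neg hc, getD_set_1d]
    split_ifs with h1
    · rw [getD_set_1d]
      split_ifs with h2
      · exfalso; apply hc
        obtain ⟨hia, hil⟩ := h1
        obtain ⟨hjb, hjl⟩ := h2
        rw [hia, hjb] at hjl
        exact ⟨by omega, by omega, by omega, hjl⟩
      · rw [h1.1]
    · rfl

lemma pvScatter (step : List (List Int) → Int → List (List Int)) (C : Int → Bool) (V : Int)
    (S : List Nat) (a b : Nat) :
    ∀ (L : List Int) (res : List (List Int)),
      (∀ r x, x ∈ L → pvShape r = S → pvShape (step r x) = S) →
      (∀ r x, x ∈ L → pvShape r = S → rdN (step r x) a b = if C x then V else rdN r a b) →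
      pvShape res = S →
      pvShape (L.foldl step res) = S ∧
      rdN (L.foldl step res) a b = if L.any C then V else rdN res a b := by
  intro L
  induction L with
  | nil => intro res _ _ hres; refine ⟨hres, ?_⟩; simp
  | cons x L ih =>
    intro res hsh hst hres
    simp only [List.foldl_cons, List.any_cons]
    have h1 : pvShape (step res x) = S := hsh res x (by simp) hres
    obtain ⟨hA, hB⟩ := ih (step res x)
      (fun r y hy => hsh r y (by simp [hy]))
      (fun r y hy => hst r y (by simp [hy])) h1
    refine ⟨hA, ?_⟩
    rw [hB, hst res x (by simp) hres]
    rcases Bool.eq_false_or_eq_true (C x) with hC | hC <;> simp [hC, ite_self]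
lemma pvPass (grid : List (List Int)) (S : List Nat) (a b : Nat)
    (ti tj : Int → Int → Int) (Lout Lin : List Int)
    (hnn : ∀ i ∈ Lout, ∀ j ∈ Lin, 0 ≤ ti i j ∧ 0 ≤ tj i j)
    (res : List (List Int)) (hres : pvShape res = S) :
    pvShape (Lout.foldl (fun r i => Lin.foldl (fun r2 j =>
        if pvRead grid i j = 3 then pvWrite r2 (ti i j) (tj i j) 3 else r2) r) res) = S ∧
    rdN (Lout.foldl (fun r i => Lin.foldl (fun r2 j =>
        if pvRead grid i j = 3 then pvWrite r2 (ti i j) (tj i j) 3 else r2) r) res) a b =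
      if Lout.any (fun i => Lin.any (fun j =>
          decide (pvRead grid i j = 3 ∧ ti i j = (a : Int) ∧ tj i j = (b : Int) ∧
            a < S.length ∧ b < S.getD a 0))) = true
      then 3 else rdN res a b := by
  have key : ∀ (r : List (List Int)) (i : Int), i ∈ Lout → pvShape r = S →
      pvShape (Lin.foldl (fun r2 j =>
        if pvRead grid i j = 3 then pvWrite r2 (ti i j) (tj i j) 3 else r2) r) = S ∧
      rdN (Lin.foldl (fun r2 j =>
        if pvRead grid i j = 3 then pvWrite r2 (ti i j) (tj i j) 3 else r2) r) a b =
        if Lin.any (fun j => decide (pvRead grid i j = 3 ∧ ti i j = (a : Int) ∧ tj i j = (b : Int) ∧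
            a < S.length ∧ b < S.getD a 0)) = true then 3 else rdN r a b := by
    intro r i hiL hr
    refine pvScatter _ _ 3 S a b Lin r ?_ ?_ hr
    · intro r2 j hj hr2
      by_cases h3 : pvRead grid i j = 3
      · simp only [if_pos h3]; rw [pvShape_pvWrite]; exact hr2
      · simp only [if_neg h3]; exact hr2
    · intro r2 j hj hr2
      by_cases h3 : pvRead grid i j = 3
      · simp only [if_pos h3]
        rw [rdN_pvWrite _ _ _ _ _ _ (hnn i hiL j hj).1 (hnn i hiL j hj).2]
        have hl : r2.length = S.length := by rw [← hr2, pvShape_length]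
        have hg : (r2.getD a []).length = S.getD a 0 := by rw [← hr2, pvShape_getD]
        rw [hl, hg]
        simp [h3]
      · simp [h3]
  refine pvScatter _ _ 3 S a b Lout res ?_ ?_ hres
  · intro r i hi hr; exact (key r i hi hr).1
  · intro r i hi hr; exact (key r i hi hr).2

lemma row_len (grid : List (List Int)) (a : Nat)
    (hrect : ∀ r ∈ grid, r.length = (grid.headD []).length) (ha : a < grid.length) :
    (grid.getD a []).length = (grid.headD []).length := by
  rw [List.getD_eq_getElem _ _ ha]
  exact hrect _ (List.getElem_mem ha)

lemma pvShape_rect (grid : List (List Int))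
    (hrect : ∀ r ∈ grid, r.length = (grid.headD []).length) :
    pvShape grid = List.replicate grid.length (grid.headD []).length := by
  rw [List.eq_replicate_iff]
  refine ⟨by simp [pvShape], ?_⟩
  intro x hx
  simp only [pvShape, List.mem_map] at hx
  obtain ⟨r, hr, rfl⟩ := hx
  exact hrect r hr
lemma pyGetD_zero_headD (grid : List (List Int)) (hne : grid ≠ []) :
    PySem.List.pyGetD grid (0 : Int) ([] : List Int) = grid.headD [] := by
  cases grid with
  | nil => exact absurd rfl hne
  | cons r t => simp [PySem.List.pyGetD_zero]

lemma pvGridCopy_char (grid : List (List Int)) (hne : grid ≠ [])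
    (hrect : ∀ r ∈ grid, r.length = (grid.headD []).length) :
    pvShape (pvGridCopy grid) = pvShape grid ∧
    ∀ a b : Nat, a < grid.length → b < (grid.headD []).length →
      rdN (pvGridCopy grid) a b = rdN grid a b := by
  have h0 := pyGetD_zero_headD grid hne
  have hrep := pvShape_rect grid hrect
  have hZ : pvShape ((PySem.List.pyRange 0 (grid.length : Int) 1).map (fun _ =>
      (PySem.List.pyRange 0 ((PySem.List.pyGetD grid 0 ([] : List Int)).length : Int) 1).map
        (fun _ => (0 : Int)))) = pvShape grid := by
    rw [hrep]
    unfold pvShape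
    rw [List.map_map, List.eq_replicate_iff]
    constructor
    · simp [PySem.List.length_pyRange_one]
    · intro x hx
      simp only [List.mem_map, Function.comp] at hx
      obtain ⟨i, _, rfl⟩ := hx
      simp [PySem.List.length_pyRange_one, h0]
  have main : ∀ a b : Nat,
      pvShape (pvGridCopy grid) = pvShape grid ∧
      rdN (pvGridCopy grid) a b =
        if ((PySem.List.pyRange 0 (grid.length : Int) 1).any (fun i =>
            (PySem.List.pyRange 0 ((PySem.List.pyGetD grid i ([] : List Int)).length : Int) 1).any
              (fun j => decide (i = (a : Int) ∧ j = (b : Int) ∧ a < (pvShape grid).length ∧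
                b < (pvShape grid).getD a 0)))) = true
        then rdN grid a b
        else rdN ((PySem.List.pyRange 0 (grid.length : Int) 1).map (fun _ =>
          (PySem.List.pyRange 0 ((PySem.List.pyGetD grid 0 ([] : List Int)).length : Int) 1).map
            (fun _ => (0 : Int)))) a b := by
    intro a b
    have key : ∀ (r : List (List Int)) (i : Int), i ∈ PySem.List.pyRange 0 (grid.length : Int) 1 →
        pvShape r = pvShape grid →
        pvShape ((PySem.List.pyRange 0 ((PySem.List.pyGetD grid i ([] : List Int)).length : Int) 1).foldl
          (fun r2 j => pvWrite r2 i j (pvRead grid i j)) r) = pvShape grid ∧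
        rdN ((PySem.List.pyRange 0 ((PySem.List.pyGetD grid i ([] : List Int)).length : Int) 1).foldl
          (fun r2 j => pvWrite r2 i j (pvRead grid i j)) r) a b =
          if ((PySem.List.pyRange 0 ((PySem.List.pyGetD grid i ([] : List Int)).length : Int) 1).any
              (fun j => decide (i = (a : Int) ∧ j = (b : Int) ∧ a < (pvShape grid).length ∧
                b < (pvShape grid).getD a 0))) = true then rdN grid a b else rdN r a b := by
      intro r i hi hr
      have hi0 : 0 ≤ i := (PySem.List.mem_pyRange_one.mp hi).1
      refine pvScatter _ _ (rdN grid a b) (pvShape grid) a b _ r ?_ ?_ hr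
      · intro r2 j hj hr2
        rw [pvShape_pvWrite]; exact hr2
      · intro r2 j hj hr2
        have hj0 : 0 ≤ j := (PySem.List.mem_pyRange_one.mp hj).1
        rw [rdN_pvWrite _ _ _ _ _ _ hi0 hj0]
        have hl : r2.length = (pvShape grid).length := by rw [← hr2, pvShape_length]
        have hg : (r2.getD a []).length = (pvShape grid).getD a 0 := by rw [← hr2, pvShape_getD]
        rw [hl, hg]
        by_cases hP : i = (a : Int) ∧ j = (b : Int) ∧ a < (pvShape grid).length ∧ b < (pvShape grid).getD a 0
        · rw [if_pos hP, if_pos (by simpa using hP)]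
          obtain ⟨e1, e2, _⟩ := hP
          rw [e1, e2, pvRead_natCast]
        · rw [if_neg hP, if_neg (by simpa using hP)]
    unfold pvGridCopy
    exact pvScatter _ _ (rdN grid a b) (pvShape grid) a b _ _
      (fun r i hi hr => (key r i hi hr).1) (fun r i hi hr => (key r i hi hr).2) hZ
  refine ⟨(main 0 0).1, ?_⟩
  intro a b ha hb
  rw [(main a b).2, if_pos ?_]
  rw [List.any_eq_true]
  refine ⟨(a : Int), PySem.List.mem_pyRange_one.mpr ⟨by omega, by exact_mod_cast ha⟩, ?_⟩
  rw [List.any_eq_true]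
  refine ⟨(b : Int), PySem.List.mem_pyRange_one.mpr ⟨by omega, ?_⟩, ?_⟩
  · rw [PySem.List.pyGetD_natCast, row_len grid a hrect ha]
    exact_mod_cast hb
  · rw [decide_eq_true_eq]
    refine ⟨rfl, rfl, ?_, ?_⟩
    · rw [pvShape_length]; exact ha
    · rw [pvShape_getD, row_len grid a hrect ha]; exact hb
lemma pass1_char (grid : List (List Int)) (S : List Nat) (a b : Nat)
    (res : List (List Int)) (hres : pvShape res = S) :
    pvShape ((PySem.List.pyRange 1 (grid.length : Int) 1).foldl (fun r i =>
      (PySem.List.pyRange 0 ((grid.headD []).length : Int) 1).foldl (fun r2 j =>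
        if pvRead grid i j = 3 then pvWrite r2 (i - 1) j 3 else r2) r) res) = S ∧
    rdN ((PySem.List.pyRange 1 (grid.length : Int) 1).foldl (fun r i =>
      (PySem.List.pyRange 0 ((grid.headD []).length : Int) 1).foldl (fun r2 j =>
        if pvRead grid i j = 3 then pvWrite r2 (i - 1) j 3 else r2) r) res) a b =
      if ((PySem.List.pyRange 1 (grid.length : Int) 1).any (fun i =>
          (PySem.List.pyRange 0 ((grid.headD []).length : Int) 1).any (fun j =>
            decide (pvRead grid i j = 3 ∧ i - 1 = (a : Int) ∧ j = (b : Int) ∧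
              a < S.length ∧ b < S.getD a 0)))) = true
      then 3 else rdN res a b :=
  pvPass grid S a b (fun i _ => i - 1) (fun _ j => j) _ _
    (fun i hi j hj => ⟨by have := (PySem.List.mem_pyRange_one.mp hi).1; beta_reduce; omega,
                       (PySem.List.mem_pyRange_one.mp hj).1⟩) res hres

lemma pass2_char (grid : List (List Int)) (S : List Nat) (a b : Nat)
    (res : List (List Int)) (hres : pvShape res = S) :
    pvShape ((PySem.List.pyRange 0 (grid.length : Int) 1).foldl (fun r k =>
      (PySem.List.pyRange (((grid.headD []).length : Int) - 2) (-1) (-1)).foldl (fun r2 l =>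
        if pvRead grid k l = 3 then pvWrite r2 k (l + 1) 3 else r2) r) res) = S ∧
    rdN ((PySem.List.pyRange 0 (grid.length : Int) 1).foldl (fun r k =>
      (PySem.List.pyRange (((grid.headD []).length : Int) - 2) (-1) (-1)).foldl (fun r2 l =>
        if pvRead grid k l = 3 then pvWrite r2 k (l + 1) 3 else r2) r) res) a b =
      if ((PySem.List.pyRange 0 (grid.length : Int) 1).any (fun k =>
          (PySem.List.pyRange (((grid.headD []).length : Int) - 2) (-1) (-1)).any (fun l =>
            decide (pvRead grid k l = 3 ∧ k = (a : Int) ∧ l + 1 = (b : Int) ∧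
              a < S.length ∧ b < S.getD a 0)))) = true
      then 3 else rdN res a b :=
  pvPass grid S a b (fun k _ => k) (fun _ l => l + 1) _ _
    (fun k hk l hl => ⟨(PySem.List.mem_pyRange_one.mp hk).1,
                       by have := (PySem.List.mem_pyRange_neg_one.mp hl).1; beta_reduce; omega⟩) res hres

lemma pass3_char (grid : List (List Int)) (S : List Nat) (a b : Nat)
    (res : List (List Int)) (hres : pvShape res = S) :
    pvShape ((PySem.List.pyRange ((grid.length : Int) - 2) (-1) (-1)).foldl (fun r m =>
      (PySem.List.pyRange 0 ((grid.headD []).length : Int) 1).foldl (fun r2 n =>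
        if pvRead grid m n = 3 then pvWrite r2 (m + 1) n 3 else r2) r) res) = S ∧
    rdN ((PySem.List.pyRange ((grid.length : Int) - 2) (-1) (-1)).foldl (fun r m =>
      (PySem.List.pyRange 0 ((grid.headD []).length : Int) 1).foldl (fun r2 n =>
        if pvRead grid m n = 3 then pvWrite r2 (m + 1) n 3 else r2) r) res) a b =
      if ((PySem.List.pyRange ((grid.length : Int) - 2) (-1) (-1)).any (fun m =>
          (PySem.List.pyRange 0 ((grid.headD []).length : Int) 1).any (fun n =>
            decide (pvRead grid m n = 3 ∧ m + 1 = (a : Int) ∧ n = (b : Int) ∧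
              a < S.length ∧ b < S.getD a 0)))) = true
      then 3 else rdN res a b :=
  pvPass grid S a b (fun m _ => m + 1) (fun _ n => n) _ _
    (fun m hm n hn => ⟨by have := (PySem.List.mem_pyRange_neg_one.mp hm).1; beta_reduce; omega,
                       (PySem.List.mem_pyRange_one.mp hn).1⟩) res hres

lemma pass4_char (grid : List (List Int)) (S : List Nat) (a b : Nat)
    (res : List (List Int)) (hres : pvShape res = S) :
    pvShape ((PySem.List.pyRange 0 (grid.length : Int) 1).foldl (fun r o =>
      (PySem.List.pyRange 1 ((grid.headD []).length : Int) 1).foldl (fun r2 p =>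
        if pvRead grid o p = 3 then pvWrite r2 o (p - 1) 3 else r2) r) res) = S ∧
    rdN ((PySem.List.pyRange 0 (grid.length : Int) 1).foldl (fun r o =>
      (PySem.List.pyRange 1 ((grid.headD []).length : Int) 1).foldl (fun r2 p =>
        if pvRead grid o p = 3 then pvWrite r2 o (p - 1) 3 else r2) r) res) a b =
      if ((PySem.List.pyRange 0 (grid.length : Int) 1).any (fun o =>
          (PySem.List.pyRange 1 ((grid.headD []).length : Int) 1).any (fun p =>
            decide (pvRead grid o p = 3 ∧ o = (a : Int) ∧ p - 1 = (b : Int) ∧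
              a < S.length ∧ b < S.getD a 0)))) = true
      then 3 else rdN res a b :=
  pvPass grid S a b (fun o _ => o) (fun _ p => p - 1) _ _
    (fun o ho p hp => ⟨(PySem.List.mem_pyRange_one.mp ho).1,
                       by have := (PySem.List.mem_pyRange_one.mp hp).1; beta_reduce; omega⟩) res hres

lemma cond1_iff (grid : List (List Int)) (a b : Nat)
    (hrect : ∀ r ∈ grid, r.length = (grid.headD []).length)
    (ha : a < grid.length) (hb : b < (grid.headD []).length) :
    ((PySem.List.pyRange 1 (grid.length : Int) 1).any (fun i =>
        (PySem.List.pyRange 0 ((grid.headD []).length : Int) 1).any (fun j =>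
          decide (pvRead grid i j = 3 ∧ i - 1 = (a : Int) ∧ j = (b : Int) ∧
            a < (pvShape grid).length ∧ b < (pvShape grid).getD a 0)))) = true
      ↔ ((a : Int) < (grid.length : Int) - 1 ∧ pvRead grid ((a : Int) + 1) (b : Int) = 3) := by
  have hSlen : (pvShape grid).length = grid.length := pvShape_length grid
  have hSget : (pvShape grid).getD a 0 = (grid.headD []).length := by
    rw [pvShape_getD]; exact row_len grid a hrect ha
  rw [List.any_eq_true]
  constructor
  · rintro ⟨i, hiM, hin⟩
    rw [List.any_eq_true] at hin
    obtain ⟨j, hjM, hj⟩ := hin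
    rw [PySem.List.mem_pyRange_one] at hiM hjM
    rw [decide_eq_true_eq] at hj
    obtain ⟨h3, he1, he2, _, _⟩ := hj
    have hi : i = (a : Int) + 1 := by omega
    rw [hi, he2] at h3
    exact ⟨by omega, h3⟩
  · rintro ⟨hlt, h3⟩
    refine ⟨(a : Int) + 1, PySem.List.mem_pyRange_one.mpr ⟨by omega, by omega⟩, ?_⟩
    rw [List.any_eq_true]
    refine ⟨(b : Int), PySem.List.mem_pyRange_one.mpr ⟨by omega, by omega⟩, ?_⟩
    rw [decide_eq_true_eq]
    exact ⟨h3, by omega, rfl, by rw [hSlen]; exact ha, by rw [hSget]; exact hb⟩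

lemma cond2_iff (grid : List (List Int)) (a b : Nat)
    (hrect : ∀ r ∈ grid, r.length = (grid.headD []).length)
    (ha : a < grid.length) (hb : b < (grid.headD []).length) :
    ((PySem.List.pyRange 0 (grid.length : Int) 1).any (fun k =>
        (PySem.List.pyRange (((grid.headD []).length : Int) - 2) (-1) (-1)).any (fun l =>
          decide (pvRead grid k l = 3 ∧ k = (a : Int) ∧ l + 1 = (b : Int) ∧
            a < (pvShape grid).length ∧ b < (pvShape grid).getD a 0)))) = true
      ↔ (0 < (b : Int) ∧ pvRead grid (a : Int) ((b : Int) - 1) = 3) := by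
  have hSget : (pvShape grid).getD a 0 = (grid.headD []).length := by
    rw [pvShape_getD]; exact row_len grid a hrect ha
  rw [List.any_eq_true]
  constructor
  · rintro ⟨k, hkM, hin⟩
    rw [List.any_eq_true] at hin
    obtain ⟨l, hlM, hl⟩ := hin
    rw [PySem.List.mem_pyRange_one] at hkM
    rw [PySem.List.mem_pyRange_neg_one] at hlM
    rw [decide_eq_true_eq] at hl
    obtain ⟨h3, he1, he2, _, _⟩ := hl
    have hk : k = (a : Int) := he1
    have hll : l = (b : Int) - 1 := by omega
    rw [hk, hll] at h3
    exact ⟨by omega, h3⟩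
  · rintro ⟨hlt, h3⟩
    refine ⟨(a : Int), PySem.List.mem_pyRange_one.mpr ⟨by omega, by omega⟩, ?_⟩
    rw [List.any_eq_true]
    refine ⟨(b : Int) - 1, PySem.List.mem_pyRange_neg_one.mpr ⟨by omega, by omega⟩, ?_⟩
    rw [decide_eq_true_eq]
    exact ⟨h3, rfl, by omega, by rw [pvShape_length]; exact ha, by rw [hSget]; exact hb⟩

lemma cond3_iff (grid : List (List Int)) (a b : Nat)
    (hrect : ∀ r ∈ grid, r.length = (grid.headD []).length)
    (ha : a < grid.length) (hb : b < (grid.headD []).length) :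
    ((PySem.List.pyRange ((grid.length : Int) - 2) (-1) (-1)).any (fun m =>
        (PySem.List.pyRange 0 ((grid.headD []).length : Int) 1).any (fun n =>
          decide (pvRead grid m n = 3 ∧ m + 1 = (a : Int) ∧ n = (b : Int) ∧
            a < (pvShape grid).length ∧ b < (pvShape grid).getD a 0)))) = true
      ↔ (0 < (a : Int) ∧ pvRead grid ((a : Int) - 1) (b : Int) = 3) := by
  have hSget : (pvShape grid).getD a 0 = (grid.headD []).length := by
    rw [pvShape_getD]; exact row_len grid a hrect ha
  rw [List.any_eq_true]
  constructor
  · rintro ⟨m, hmM, hin⟩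
    rw [List.any_eq_true] at hin
    obtain ⟨n, hnM, hn⟩ := hin
    rw [PySem.List.mem_pyRange_neg_one] at hmM
    rw [PySem.List.mem_pyRange_one] at hnM
    rw [decide_eq_true_eq] at hn
    obtain ⟨h3, he1, he2, _, _⟩ := hn
    have hm : m = (a : Int) - 1 := by omega
    rw [hm, he2] at h3
    exact ⟨by omega, h3⟩
  · rintro ⟨hlt, h3⟩
    refine ⟨(a : Int) - 1, PySem.List.mem_pyRange_neg_one.mpr ⟨by omega, by omega⟩, ?_⟩
    rw [List.any_eq_true]
    refine ⟨(b : Int), PySem.List.mem_pyRange_one.mpr ⟨by omega, by omega⟩, ?_⟩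
    rw [decide_eq_true_eq]
    exact ⟨h3, by omega, rfl, by rw [pvShape_length]; exact ha, by rw [hSget]; exact hb⟩

lemma cond4_iff (grid : List (List Int)) (a b : Nat)
    (hrect : ∀ r ∈ grid, r.length = (grid.headD []).length)
    (ha : a < grid.length) (hb : b < (grid.headD []).length) :
    ((PySem.List.pyRange 0 (grid.length : Int) 1).any (fun o =>
        (PySem.List.pyRange 1 ((grid.headD []).length : Int) 1).any (fun p =>
          decide (pvRead grid o p = 3 ∧ o = (a : Int) ∧ p - 1 = (b : Int) ∧
            a < (pvShape grid).length ∧ b < (pvShape grid).getD a 0)))) = true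
      ↔ ((b : Int) < ((grid.headD []).length : Int) - 1 ∧ pvRead grid (a : Int) ((b : Int) + 1) = 3) := by
  have hSget : (pvShape grid).getD a 0 = (grid.headD []).length := by
    rw [pvShape_getD]; exact row_len grid a hrect ha
  rw [List.any_eq_true]
  constructor
  · rintro ⟨o, hoM, hin⟩
    rw [List.any_eq_true] at hin
    obtain ⟨p, hpM, hp⟩ := hin
    rw [PySem.List.mem_pyRange_one] at hoM hpM
    rw [decide_eq_true_eq] at hp
    obtain ⟨h3, he1, he2, _, _⟩ := hp
    have hpp : p = (b : Int) + 1 := by omega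
    rw [he1, hpp] at h3
    exact ⟨by omega, h3⟩
  · rintro ⟨hlt, h3⟩
    refine ⟨(a : Int), PySem.List.mem_pyRange_one.mpr ⟨by omega, by omega⟩, ?_⟩
    rw [List.any_eq_true]
    refine ⟨(b : Int) + 1, PySem.List.mem_pyRange_one.mpr ⟨by omega, by omega⟩, ?_⟩
    rw [decide_eq_true_eq]
    exact ⟨h3, rfl, by omega, by rw [pvShape_length]; exact ha, by rw [hSget]; exact hb⟩

lemma ite_chain (c4 c3 c2 c1 : Bool) (P1 P2 P3 P4 : Prop)
    [Decidable P1] [Decidable P2] [Decidable P3] [Decidable P4] (X : Int)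
    (h4 : c4 = true ↔ P4) (h3 : c3 = true ↔ P1) (h2 : c2 = true ↔ P3) (h1 : c1 = true ↔ P2) :
    (if c4 = true then (3 : Int) else if c3 = true then 3 else if c2 = true then 3
      else if c1 = true then 3 else X)
      = if (P1 ∨ P2 ∨ P3 ∨ P4) then 3 else X := by
  split_ifs <;> first | rfl | tauto

set_option maxHeartbeats 2000000 in
lemma A_char (grid : List (List Int)) (hne : grid ≠ [])
    (hrect : ∀ r ∈ grid, r.length = (grid.headD []).length) :
    pvShape (growingColor3 grid) = pvShape grid ∧
    ∀ a b : Nat, a < grid.length → b < (grid.headD []).length →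
      rdN (growingColor3 grid) a b =
        if (0 < (a : Int) ∧ pvRead grid ((a : Int) - 1) (b : Int) = 3) ∨
           ((a : Int) < (grid.length : Int) - 1 ∧ pvRead grid ((a : Int) + 1) (b : Int) = 3) ∨
           (0 < (b : Int) ∧ pvRead grid (a : Int) ((b : Int) - 1) = 3) ∨
           ((b : Int) < ((grid.headD []).length : Int) - 1 ∧ pvRead grid (a : Int) ((b : Int) + 1) = 3)
        then 3 else rdN grid a b := by
  have h0 := pyGetD_zero_headD grid hne
  have c0 := pvGridCopy_char grid hne hrect
  have s0 := c0.1
  have s1 := (pass1_char grid (pvShape grid) 0 0 _ s0).1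
  have s2 := (pass2_char grid (pvShape grid) 0 0 _ s1).1
  have s3 := (pass3_char grid (pvShape grid) 0 0 _ s2).1
  constructor
  · simp only [growingColor3]
    rw [h0]
    exact (pass4_char grid (pvShape grid) 0 0 _ s3).1
  · intro a b ha hb
    have hSlen : (pvShape grid).length = grid.length := pvShape_length grid
    have hSget : (pvShape grid).getD a 0 = (grid.headD []).length := by
      rw [pvShape_getD]; exact row_len grid a hrect ha
    unfold growingColor3
    rw [h0]
    rw [(pass4_char grid (pvShape grid) a b _ s3).2,
        (pass3_char grid (pvShape grid) a b _ s2).2,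
        (pass2_char grid (pvShape grid) a b _ s1).2,
        (pass1_char grid (pvShape grid) a b _ s0).2,
        c0.2 a b ha hb]
    exact ite_chain _ _ _ _ _ _ _ _ (rdN grid a b)
      (cond4_iff grid a b hrect ha hb) (cond3_iff grid a b hrect ha hb)
      (cond2_iff grid a b hrect ha hb) (cond1_iff grid a b hrect ha hb)

-- ===== VERDICT =====
theorem growingColor3_spec : Claim_equal_growingColor3 := by
  unfold Claim_equal_growingColor3
  intro grid _ hpre
  unfold Spec_growingColor3
  obtain ⟨hne, hrect⟩ := hpre
  have h0 := pyGetD_zero_headD grid hne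
  obtain ⟨hsh, hcell⟩ := A_char grid hne hrect
  have hlenA : (growingColor3 grid).length = grid.length := by
    have := congrArg List.length hsh
    simpa [pvShape] using this
  apply List.ext_getElem
  · rw [hlenA]
    unfold growingColor3_alt
    rw [h0]
    simp [PySem.List.length_pyRange_one]
  · intro a h1 h2
    have ha' : a < grid.length := by rwa [hlenA] at h1
    have hrowlen : (growingColor3 grid)[a].length = (grid.headD []).length := by
      rw [← List.getD_eq_getElem _ _ h1]
      rw [show ((growingColor3 grid).getD a []).length = (pvShape (growingColor3 grid)).getD a 0
            from (pvShape_getD _ _).symm, hsh, pvShape_getD]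
      exact row_len grid a hrect ha'
    have haltrow : (growingColor3_alt grid)[a] =
        (PySem.List.pyRange 0 ((grid.headD []).length : Int) 1).map
          (fun j => pvCell grid (grid.length : Int) ((grid.headD []).length : Int) (a : Int) j) := by
      simp only [growingColor3_alt, h0]
      rw [List.getElem_map]
      rw [PySem.List.getElem_pyRange_one]
      simp
    rw [haltrow]
    apply List.ext_getElem
    · rw [hrowlen]
      simp [PySem.List.length_pyRange_one]
    · intro b hb1 hb2
      have hb' : b < (grid.headD []).length := by rwa [hrowlen] at hb1
      have eL : (growingColor3 grid)[a][b] = rdN (growingColor3 grid) a b := by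
        unfold rdN
        rw [List.getD_eq_getElem _ _ h1, List.getD_eq_getElem _ _ hb1]
      rw [eL, hcell a b ha' hb']
      rw [List.getElem_map]
      rw [PySem.List.getElem_pyRange_one]
      unfold pvCell
      rw [zero_add]
      rw [pvRead_natCast]
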